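-- pv_equiv track=rewrite | github.com/ahmetgocmeen/Artificial-Intelligence | Lecture 13 March 2024/libic.py | minmaxListaIC
-- ===== SOURCE A (Python) =====
-- def minmaxListaIC(l):
--     min,max = l[0][1], l[0][1]
--     for ic in l:
--         if ic[0] < min:
--             min = ic[0]
--         if ic[0] > max:
--             max = ic[0]
--         if ic[1] < min:
--             min = ic[1]
--         if ic[1] > max:
--             max = ic[1]
--     return min,max
-- ===== SOURCE B (Python) =====
-- def minmaxListaIC(l):
--     flat = [e for ic in l for e in (ic[0], ic[1])]
--     return min(flat), max(flat)
-- ===== Notes on version B (the rewrite author's own statement) =====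
-- stated objective: idiomatic
-- what changed: Replaces the fused four-branch running min/max loop by flattening all interval endpoints into one list and applying built-in min and max.
-- outside the precondition, e.g. on minmaxListaIC([]): A raises IndexError, B raises ValueError
import Mathlib
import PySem

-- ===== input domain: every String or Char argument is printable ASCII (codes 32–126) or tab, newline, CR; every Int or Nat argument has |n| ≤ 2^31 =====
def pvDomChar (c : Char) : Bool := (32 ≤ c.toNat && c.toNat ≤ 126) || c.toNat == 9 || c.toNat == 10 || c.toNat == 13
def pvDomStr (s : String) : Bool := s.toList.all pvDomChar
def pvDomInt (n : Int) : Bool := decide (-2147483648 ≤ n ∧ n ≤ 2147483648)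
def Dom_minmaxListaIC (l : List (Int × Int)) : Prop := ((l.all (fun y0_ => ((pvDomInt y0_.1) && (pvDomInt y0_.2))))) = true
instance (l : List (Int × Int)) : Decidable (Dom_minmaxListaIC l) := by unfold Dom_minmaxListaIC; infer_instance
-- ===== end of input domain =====

-- B flattens all endpoints and uses built-in min/max instead of A's fused four-branch loop; return values agree on every non-empty list.

-- ===== PORT A =====
-- A: seed min,max with l[0][1], then one loop with four comparison branches.
def minmaxListaIC (l : List (Int × Int)) : Int × Int :=
  match PySem.List.pyGet? l 0 with
  | none => (0, 0)  -- unreachable under Pre_: Python raises IndexError on []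
  | some first =>
    l.foldl (fun (mm : Int × Int) ic =>
      let mn1 := if ic.1 < mm.1 then ic.1 else mm.1
      let mx1 := if ic.1 > mm.2 then ic.1 else mm.2
      let mn2 := if ic.2 < mn1 then ic.2 else mn1
      let mx2 := if ic.2 > mx1 then ic.2 else mx1
      (mn2, mx2)) (first.2, first.2)

-- ===== PORT B =====
-- B: flat list of all endpoints, then built-in min and max.
def minmaxListaIC_alt (l : List (Int × Int)) : Int × Int :=
  let flat := l.flatMap (fun ic => [ic.1, ic.2])
  ((PySem.List.min? flat (fun x => x)).getD 0,
   (PySem.List.max? flat (fun x => x)).getD 0)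

-- ===== PRECONDITION & SPEC =====
-- Pre_ excludes only the empty list, on which Python A raises IndexError (and B raises ValueError).
def Pre_minmaxListaIC (l : List (Int × Int)) : Prop := l ≠ []
instance (l : List (Int × Int)) : Decidable (Pre_minmaxListaIC l) := by unfold Pre_minmaxListaIC; infer_instance
def pvWitness_minmaxListaIC : (List (Int × Int)) := [(3, -1), (0, 7)]

def Spec_minmaxListaIC (l : List (Int × Int)) (out : Int × Int) : Prop := out = minmaxListaIC_alt l
instance (l : List (Int × Int)) (out : Int × Int) : Decidable (Spec_minmaxListaIC l out) := by unfold Spec_minmaxListaIC; infer_instance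

-- ===== CLAIM (what is proved, stated in full; the proofs are below) =====
def Claim_equal_minmaxListaIC : Prop := ∀ (l : List (Int × Int)), Dom_minmaxListaIC l → Pre_minmaxListaIC l → Spec_minmaxListaIC l (minmaxListaIC l)

-- ===== LEMMAS AND PROOFS =====

-- A's if-branches compute min/max.
theorem pv_ite_min (a b : Int) : (if a < b then a else b) = min a b := by
  rcases lt_or_ge a b with h | h
  · simp [h, min_eq_left h.le]
  · simp [not_lt.mpr h, min_eq_right h]

theorem pv_ite_max (a b : Int) : (if a > b then a else b) = max a b := by
  rcases lt_or_ge b a with h | h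
  · simp [h, max_eq_left h.le]
  · simp [not_lt.mpr h, max_eq_right h]

-- A's fold from state (mn, mx) is the running min/max over all endpoints.
theorem pv_foldA (l : List (Int × Int)) (mn mx : Int) :
    l.foldl (fun (mm : Int × Int) ic =>
      let mn1 := if ic.1 < mm.1 then ic.1 else mm.1
      let mx1 := if ic.1 > mm.2 then ic.1 else mm.2
      let mn2 := if ic.2 < mn1 then ic.2 else mn1
      let mx2 := if ic.2 > mx1 then ic.2 else mx1
      (mn2, mx2)) (mn, mx)
    = ((l.flatMap (fun ic => [ic.1, ic.2])).foldl min mn,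
       (l.flatMap (fun ic => [ic.1, ic.2])).foldl max mx) := by
  induction l generalizing mn mx with
  | nil => simp
  | cons p t ih =>
    simp only [List.foldl_cons, List.flatMap_cons, List.cons_append, List.nil_append]
    rw [pv_ite_min, pv_ite_max, pv_ite_min, pv_ite_max]
    rw [ih]
    simp [min_comm, max_comm]

theorem minmaxListaIC_spec : Claim_equal_minmaxListaIC := by
  intro l _ hpre
  unfold Spec_minmaxListaIC minmaxListaIC minmaxListaIC_alt
  match l with
  | [] => exact absurd rfl hpre
  | p :: t =>
    have hg : PySem.List.pyGet? (p :: t) (0 : Int) = some p := by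
      simp [PySem.List.pyGet?, PySem.List.pyIdx?]
    rw [hg]
    simp only []
    rw [pv_foldA (p :: t) p.2 p.2]
    simp only [List.flatMap_cons, List.cons_append, List.nil_append,
      PySem.List.min?_id_cons, PySem.List.max?_id_cons, Option.getD_some,
      List.foldl_cons]
    have h1 : min (min p.2 p.1) p.2 = min p.1 p.2 := by omega
    have h2 : max (max p.2 p.1) p.2 = max p.1 p.2 := by omega
    rw [h1, h2]
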